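-- pv_equiv track=rewrite | github.com/nabz0r/xposeTIP | api/services/layer4/graph_builder.py | _match_url_platform
-- ===== SOURCE A (Python) =====
-- URL_PLATFORM_MAP = {
--     "twitter.com": "Twitter",
--     "x.com": "Twitter",
--     "instagram.com": "Instagram",
--     "facebook.com": "Facebook",
--     "github.com": "GitHub",
--     "linkedin.com": "LinkedIn",
--     "pinterest.com": "Pinterest",
--     "spotify.com": "Spotify",
--     "reddit.com": "Reddit",
--     "tiktok.com": "TikTok",
--     "youtube.com": "YouTube",
--     "snapchat.com": "Snapchat",
--     "discord.com": "Discord",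
-- }
--
-- def _match_url_platform(url):
--     """Axe 5: Proper domain matching — check if URL host ends with a known domain."""
--     if not url:
--         return None, None
--     url_lower = url.lower()
--     # Strip protocol
--     host = url_lower.split("://", 1)[-1].split("/", 1)[0].split("?", 1)[0]
--     for domain, name in URL_PLATFORM_MAP.items():
--         if host == domain or host.endswith("." + domain):
--             return domain, name
--     return None, None
-- ===== SOURCE B (Python) =====
-- URL_PLATFORM_MAP = {
--     "twitter.com": "Twitter",
--     "x.com": "Twitter",
--     "instagram.com": "Instagram",
--     "facebook.com": "Facebook",
--     "github.com": "GitHub",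
--     "linkedin.com": "LinkedIn",
--     "pinterest.com": "Pinterest",
--     "spotify.com": "Spotify",
--     "reddit.com": "Reddit",
--     "tiktok.com": "TikTok",
--     "youtube.com": "YouTube",
--     "snapchat.com": "Snapchat",
--     "discord.com": "Discord",
-- }
--
-- def _match_url_platform(url):
--     """Axe 5: walk the host right-to-left and probe each dot-aligned suffix
--     directly as a dict key (no known domain is a suffix of another, so at most
--     one suffix can hit and scan order does not matter)."""
--     if not url:
--         return None, None
--     url_lower = url.lower()
--     # Strip protocol
--     host = url_lower.split("://", 1)[-1].split("/", 1)[0].split("?", 1)[0]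
--     for i in range(len(host) - 1, -1, -1):
--         if i == 0 or host[i - 1] == ".":
--             candidate = host[i:]
--             if candidate in URL_PLATFORM_MAP:
--                 return candidate, URL_PLATFORM_MAP[candidate]
--     return None, None
-- ===== Notes on version B (the rewrite author's own statement) =====
-- stated objective: alternative
-- what changed: Instead of scanning all 13 map entries and testing equality-or-endswith for each, B walks the host's character indices right-to-left and, at each dot boundary (start of host or just after a dot), probes the suffix starting there directly as a dict key; any scan order is correct because no known domain is a suffix of another.
import Mathlib
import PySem

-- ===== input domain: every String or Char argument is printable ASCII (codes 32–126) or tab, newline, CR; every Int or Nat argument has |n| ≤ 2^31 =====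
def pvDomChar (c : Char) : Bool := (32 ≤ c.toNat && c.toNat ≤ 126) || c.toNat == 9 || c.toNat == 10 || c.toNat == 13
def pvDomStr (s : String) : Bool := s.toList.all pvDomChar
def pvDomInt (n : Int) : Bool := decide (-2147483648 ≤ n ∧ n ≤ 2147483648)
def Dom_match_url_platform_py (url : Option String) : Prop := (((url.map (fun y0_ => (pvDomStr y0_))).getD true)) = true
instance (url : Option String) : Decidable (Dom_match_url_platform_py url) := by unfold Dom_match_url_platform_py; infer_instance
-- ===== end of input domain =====

-- B replaces A's scan over all 13 map entries (host == d or host.endswith("."+d) for each)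
-- by a right-to-left index walk over the host that probes each dot-aligned suffix directly
-- as a dict key (objective: alternative; correct because no known domain is a suffix of
-- another, so at most one dot-aligned suffix can be a key and scan order does not matter).

-- ===== PORT A =====

-- URL_PLATFORM_MAP as an association list in insertion order; keys kept as char lists
-- (A iterates its items; B looks candidates up in it as a dict).
def pvItems : List (List Char × String) :=
  [("twitter.com".toList, "Twitter"), ("x.com".toList, "Twitter"),
   ("instagram.com".toList, "Instagram"), ("facebook.com".toList, "Facebook"),
   ("github.com".toList, "GitHub"), ("linkedin.com".toList, "LinkedIn"),
   ("pinterest.com".toList, "Pinterest"), ("spotify.com".toList, "Spotify"),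
   ("reddit.com".toList, "Reddit"), ("tiktok.com".toList, "TikTok"),
   ("youtube.com".toList, "YouTube"), ("snapchat.com".toList, "Snapchat"),
   ("discord.com".toList, "Discord")]

-- host = url_lower.split("://", 1)[-1].split("/", 1)[0].split("?", 1)[0]
-- (shared verbatim by A and B in Python).  split(sep, 1) never returns an empty
-- list, so the [-1]/[0] indexings never raise; .getD [] is unreachable.
def pvHost (u : String) : List Char :=
  let url_lower := PySem.Chars.lower u.toList
  let p1 := (PySem.List.pyGet? (PySem.Chars.splitOnMax url_lower "://".toList 1) (-1)).getD []
  let p2 := (PySem.List.pyGet? (PySem.Chars.splitOnMax p1 "/".toList 1) 0).getD []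
  (PySem.List.pyGet? (PySem.Chars.splitOnMax p2 "?".toList 1) 0).getD []

-- 'for domain, name in URL_PLATFORM_MAP.items(): if host == domain or host.endswith("." + domain): return …'
def aScan (host : List Char) : List (List Char × String) → Option String × Option String
  | [] => (none, none)
  | (d, n) :: rest =>
      if host == d || PySem.Chars.endswith host ('.' :: d) then (some (String.ofList d), some n)
      else aScan host rest

def match_url_platform_py (url : Option String) : Option String × Option String :=
  match url with
  | none => (none, none)
  | some u =>
      if u = "" then (none, none)
      else aScan (pvHost u) pvItems

-- ===== PORT B =====

-- the same table as Python's dict object (items in insertion order)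
def pvMap : PySem.Dict (List Char) String := ⟨pvItems⟩

-- 'for i in range(len(host)-1, -1, -1):
--    if i == 0 or host[i-1] == ".":
--      candidate = host[i:]
--      if candidate in URL_PLATFORM_MAP: return candidate, URL_PLATFORM_MAP[candidate]'
-- host[i-1] is ported as pyGet? (in range whenever the branch reads it, since i ≥ 1 there).
def bLoop (host : List Char) : List Int → Option String × Option String
  | [] => (none, none)
  | i :: rest =>
      if i == 0 || PySem.List.pyGet? host (i - 1) == some '.' then
        let candidate := PySem.List.slice host (some i) none
        match PySem.Dict.get? pvMap candidate with
        | some n => (some (String.ofList candidate), some n)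
        | none => bLoop host rest
      else bLoop host rest

def match_url_platform_py_alt (url : Option String) : Option String × Option String :=
  match url with
  | none => (none, none)
  | some u =>
      if u = "" then (none, none)
      else
        let host := pvHost u
        bLoop host (PySem.List.pyRange ((host.length : Int) - 1) (-1) (-1))

-- ===== PRECONDITION & SPEC =====
def Spec_match_url_platform_py (url : Option String) (out : Option String × Option String) : Prop := out = match_url_platform_py_alt url
instance (url : Option String) (out : Option String × Option String) : Decidable (Spec_match_url_platform_py url out) := by unfold Spec_match_url_platform_py; infer_instance

-- ===== CLAIM (what is proved, stated in full; the proofs are below) =====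
def Claim_equal_match_url_platform_py : Prop := ∀ (url : Option String), Dom_match_url_platform_py url → Spec_match_url_platform_py url (match_url_platform_py url)

-- ===== LEMMAS AND PROOFS =====

-- A's per-entry test as a Prop.
def pvCond (host d : List Char) : Prop := host = d ∨ ('.' :: d) <:+ host

-- B's boundary test at index i.
def pvBnd (host : List Char) (i : Int) : Bool :=
  i == 0 || PySem.List.pyGet? host (i - 1) == some '.'

theorem pv_cond_bool (host d : List Char) :
    (host == d || PySem.Chars.endswith host ('.' :: d)) = true ↔ pvCond host d := by
  simp [pvCond, PySem.Chars.endswith_iff]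

-- Facts about the literal table, checked by computation.
theorem pvItems_no_mutual_suffix :
    ∀ p ∈ pvItems, ∀ q ∈ pvItems, ¬ ('.' :: p.1 <:+ q.1) := by decide

theorem pvItems_keyfun :
    ∀ p ∈ pvItems, ∀ q ∈ pvItems, p.1 = q.1 → p = q := by decide

theorem pvItems_nodup_keys : (PySem.Dict.keys pvMap).Nodup := by decide

theorem pvItems_ne_nil : ∀ p ∈ pvItems, p.1 ≠ [] := by decide

theorem pv_suffix_drop {a b : List Char} (h : a <:+ b) :
    b.drop (b.length - a.length) = a := by
  obtain ⟨t, rfl⟩ := h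
  simp

-- suffixes of the same list compare to each other
theorem pv_suffix_total {a b c : List Char} (ha : a <:+ c) (hb : b <:+ c)
    (hl : a.length ≤ b.length) : a <:+ b := by
  have := pv_suffix_drop hb
  calc a = (c.drop (c.length - a.length)) := (pv_suffix_drop ha).symm
    _ = (b.drop (b.length - a.length)) := by
        obtain ⟨t, rfl⟩ := hb
        have h1 : (t ++ b).length - a.length = t.length + (b.length - a.length) := by
          simp; omega
        rw [h1, ← List.drop_drop, List.drop_left]
    _ <:+ b := List.drop_suffix _ b

-- two keys both satisfying A's condition are equal
theorem pv_key_cond_unique {host d1 d2 : List Char} (n1 n2 : String)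
    (h1 : (d1, n1) ∈ pvItems) (h2 : (d2, n2) ∈ pvItems)
    (c1 : pvCond host d1) (c2 : pvCond host d2) : d1 = d2 := by
  rcases c1 with e1 | s1 <;> rcases c2 with e2 | s2
  · rw [← e1, e2]
  · exact absurd (e1 ▸ s2) (pvItems_no_mutual_suffix (d2, n2) h2 (d1, n1) h1)
  · exact absurd (e2 ▸ s1) (pvItems_no_mutual_suffix (d1, n1) h1 (d2, n2) h2)
  · by_contra hne
    rcases Nat.le_total d1.length d2.length with hl | hl
    · have hs : ('.' :: d1) <:+ ('.' :: d2) := pv_suffix_total s1 s2 (by simpa using hl)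
      rcases List.suffix_cons_iff.mp hs with heq | hsf
      · exact hne (by injection heq)
      · exact pvItems_no_mutual_suffix (d1, n1) h1 (d2, n2) h2 hsf
    · have hs : ('.' :: d2) <:+ ('.' :: d1) := pv_suffix_total s2 s1 (by simpa using hl)
      rcases List.suffix_cons_iff.mp hs with heq | hsf
      · exact hne ((List.cons_eq_cons.mp heq).2).symm
      · exact pvItems_no_mutual_suffix (d2, n2) h2 (d1, n1) h1 hsf

-- forward bridge: any boundary index yields a candidate satisfying A's condition
theorem pv_bnd_cond {host : List Char} {k : Nat} (hk : k < host.length)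
    (hb : pvBnd host (k : Int) = true) : pvCond host (host.drop k) := by
  by_cases hk0 : k = 0
  · left; simp [hk0]
  · right
    unfold pvBnd at hb
    have h0 : ((k : Int) == 0) = false := by
      simp only [beq_eq_false_iff_ne, ne_eq]
      omega
    rw [h0, Bool.false_or] at hb
    have hcast : ((k : Int) - 1) = ((k - 1 : Nat) : Int) := by omega
    rw [hcast, PySem.List.pyGet?_natCast] at hb
    have hget : host[k-1]? = some '.' := beq_iff_eq.mp hb
    have hlt : k - 1 < host.length := by omega
    have hch : host[k-1] = '.' := by
      rw [List.getElem?_eq_getElem hlt] at hget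
      injection hget
    have hdrop : host.drop (k - 1) = host[k-1] :: host.drop k := by
      have h1 : k - 1 + 1 = k := by omega
      rw [List.drop_eq_getElem_cons hlt, h1]
    rw [hch] at hdrop
    exact hdrop ▸ List.drop_suffix (k - 1) host

-- backward bridge: A's condition for a nonempty d pins a boundary index with candidate d
theorem pv_cond_bnd {host d : List Char} (hd : d ≠ []) (hc : pvCond host d) :
    ∃ k : Nat, k < host.length ∧ pvBnd host (k : Int) = true ∧ host.drop k = d := by
  rcases hc with heq | hsf
  · refine ⟨0, ?_, by simp [pvBnd], by simp [heq]⟩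
    subst heq
    exact List.length_pos_of_ne_nil hd
  · have hlen : ('.' :: d).length ≤ host.length := hsf.length_le
    set j : Nat := host.length - (d.length + 1) with hj
    have hdj : host.drop j = '.' :: d := by
      have := pv_suffix_drop hsf
      simpa [hj, List.length_cons] using this
    have hd1 : 0 < d.length := List.length_pos_of_ne_nil hd
    refine ⟨j + 1, ?_, ?_, ?_⟩
    · simp at hlen; omega
    · unfold pvBnd
      apply Bool.or_eq_true_iff.mpr
      right
      have hcast : (((j : Nat) + 1 : Int) - 1) = ((j : Nat) : Int) := by ring
      rw [show ((j + 1 : Nat) : Int) = ((j : Nat) + 1 : Int) by push_cast; ring, hcast,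
        PySem.List.pyGet?_natCast]
      have : host[j]? = some '.' := by
        have hjl : j < host.length := by
          have hd1 : 0 < d.length := List.length_pos_of_ne_nil hd
          simp at hlen; omega
        have : host[j] = '.' := by
          have := congrArg (fun l => l.head?) hdj
          simpa [List.head?_drop, List.getElem?_eq_getElem hjl] using this
        simp [List.getElem?_eq_getElem hjl, this]
      simp [this]
    · have := congrArg List.tail hdj
      simpa [List.tail_drop] using this

-- the candidate B computes at a nonnegative index is a drop
theorem pv_cand_drop (host : List Char) (k : Nat) :
    PySem.List.slice host (some (k : Int)) none = host.drop k :=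
  PySem.List.slice_from_natCast host k

-- A-side scan lemmas
theorem pv_aScan_none (host : List Char) :
    ∀ l : List (List Char × String),
      (∀ p ∈ l, ¬ pvCond host p.1) → aScan host l = (none, none) := by
  intro l
  induction l with
  | nil => intro _; rfl
  | cons p rest ih =>
      intro h
      obtain ⟨d, n⟩ := p
      have hb : (host == d || PySem.Chars.endswith host ('.' :: d)) = false := by
        rw [← Bool.not_eq_true, pv_cond_bool]; exact h (d, n) (List.mem_cons_self ..)
      simp only [aScan, hb, Bool.false_eq_true, if_false]
      exact ih fun q hq => h q (List.mem_cons_of_mem _ hq)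

theorem pv_aScan_found (host d0 : List Char) (n0 : String) :
    ∀ l : List (List Char × String), (d0, n0) ∈ l →
      pvCond host d0 →
      (∀ p ∈ l, pvCond host p.1 → p = (d0, n0)) →
      aScan host l = (some (String.ofList d0), some n0) := by
  intro l
  induction l with
  | nil => intro h; simp at h
  | cons p rest ih =>
      intro hmem hcond huniq
      obtain ⟨d, n⟩ := p
      by_cases hd : pvCond host d
      · have hdn : (d, n) = (d0, n0) := huniq (d, n) (List.mem_cons_self ..) hd
        have hd0 : d = d0 := congrArg Prod.fst hdn
        have hn0 : n = n0 := congrArg Prod.snd hdn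
        subst hd0; subst hn0
        have hb : (host == d || PySem.Chars.endswith host ('.' :: d)) = true :=
          (pv_cond_bool host d).mpr hd
        simp [aScan, hb]
      · have hb : (host == d || PySem.Chars.endswith host ('.' :: d)) = false := by
          rw [← Bool.not_eq_true, pv_cond_bool]; exact hd
        simp only [aScan, hb, Bool.false_eq_true, if_false]
        have hmem' : (d0, n0) ∈ rest := by
          rcases List.mem_cons.mp hmem with heq | h
          · exact absurd (hcond) (by rw [show d = d0 from congrArg Prod.fst heq.symm] at hd; exact hd)
          · exact h
        exact ih hmem' hcond fun q hq => huniq q (List.mem_cons_of_mem _ hq)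

-- B-side loop lemmas
theorem pv_bLoop_none (host : List Char) :
    ∀ l : List Int,
      (∀ i ∈ l, pvBnd host i = true →
        PySem.Dict.get? pvMap (PySem.List.slice host (some i) none) = none) →
      bLoop host l = (none, none) := by
  intro l
  induction l with
  | nil => intro _; rfl
  | cons i rest ih =>
      intro h
      by_cases hb : pvBnd host i = true
      · have hg := h i (List.mem_cons_self ..) hb
        unfold pvBnd at hb
        simp only [bLoop, hb, if_true, hg]
        exact ih fun j hj => h j (List.mem_cons_of_mem _ hj)
      · have hb' : (i == 0 || PySem.List.pyGet? host (i - 1) == some '.') = false := by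
          rw [← Bool.not_eq_true]; exact hb
        simp only [bLoop, hb', Bool.false_eq_true, if_false]
        exact ih fun j hj => h j (List.mem_cons_of_mem _ hj)

theorem pv_bLoop_found (host cand0 : List Char) (n0 : String) :
    ∀ l : List Int,
      (∀ i ∈ l, pvBnd host i = true → ∀ n,
        PySem.Dict.get? pvMap (PySem.List.slice host (some i) none) = some n →
        PySem.List.slice host (some i) none = cand0 ∧ n = n0) →
      (∃ i ∈ l, pvBnd host i = true ∧
        PySem.List.slice host (some i) none = cand0 ∧
        PySem.Dict.get? pvMap cand0 = some n0) →
      bLoop host l = (some (String.ofList cand0), some n0) := by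
  intro l
  induction l with
  | nil => rintro _ ⟨i, hi, _⟩; simp at hi
  | cons i rest ih =>
      rintro huniq ⟨i0, hi0, hb0, hc0, hg0⟩
      by_cases hb : pvBnd host i = true
      · cases hq : PySem.Dict.get? pvMap (PySem.List.slice host (some i) none) with
        | some n =>
            obtain ⟨hce, hne⟩ := huniq i (List.mem_cons_self ..) hb n hq
            unfold pvBnd at hb
            simp only [bLoop, hb, if_true, hce]
            rw [hg0]
        | none =>
            unfold pvBnd at hb
            simp only [bLoop, hb, if_true, hq]
            have hi0' : i0 ∈ rest := by
              rcases List.mem_cons.mp hi0 with rfl | h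
              · rw [hc0] at hq; rw [hq] at hg0; exact absurd hg0 (by simp)
              · exact h
            exact ih (fun j hj => huniq j (List.mem_cons_of_mem _ hj)) ⟨i0, hi0', hb0, hc0, hg0⟩
      · have hb' : (i == 0 || PySem.List.pyGet? host (i - 1) == some '.') = false := by
          rw [← Bool.not_eq_true]; exact hb
        simp only [bLoop, hb', Bool.false_eq_true, if_false]
        have hi0' : i0 ∈ rest := by
          rcases List.mem_cons.mp hi0 with rfl | h
          · exact absurd hb0 hb
          · exact h
        exact ih (fun j hj => huniq j (List.mem_cons_of_mem _ hj)) ⟨i0, hi0', hb0, hc0, hg0⟩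

-- membership in B's countdown range = a valid index
theorem pv_mem_range {host : List Char} {i : Int}
    (h : i ∈ PySem.List.pyRange ((host.length : Int) - 1) (-1) (-1)) :
    ∃ k : Nat, i = (k : Int) ∧ k < host.length := by
  have := (PySem.List.mem_pyRange_neg_one).mp h
  exact ⟨i.toNat, by omega, by omega⟩

-- the two scans agree on every host
theorem pv_scan_eq (host : List Char) :
    aScan host pvItems = bLoop host (PySem.List.pyRange ((host.length : Int) - 1) (-1) (-1)) := by
  by_cases hex : ∃ p ∈ pvItems, pvCond host p.1
  · obtain ⟨⟨d0, n0⟩, hmem0, hcond0⟩ := hex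
    have hget0 : PySem.Dict.get? pvMap d0 = some n0 :=
      PySem.Dict.get?_of_mem_items pvMap hmem0 pvItems_nodup_keys
    have huniqA : ∀ p ∈ pvItems, pvCond host p.1 → p = (d0, n0) := by
      rintro ⟨d, n⟩ hmem hcond
      have hd : d = d0 := pv_key_cond_unique n n0 hmem hmem0 hcond hcond0
      exact pvItems_keyfun (d, n) hmem (d0, n0) hmem0 hd
    rw [pv_aScan_found host d0 n0 pvItems hmem0 hcond0 huniqA]
    apply (pv_bLoop_found host d0 n0 _ ?uniq ?ex).symm
    case uniq =>
      intro i hi hb n hn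
      obtain ⟨k, rfl, hk⟩ := pv_mem_range hi
      rw [pv_cand_drop] at hn ⊢
      have hmem : (host.drop k, n) ∈ pvItems := PySem.Dict.mem_items_of_get?_eq_some pvMap hn
      have hcond : pvCond host (host.drop k) := pv_bnd_cond hk hb
      have := huniqA (host.drop k, n) hmem hcond
      exact ⟨congrArg Prod.fst this, congrArg Prod.snd this⟩
    case ex =>
      obtain ⟨k, hk, hb, hdk⟩ := pv_cond_bnd (pvItems_ne_nil (d0, n0) hmem0) hcond0
      refine ⟨(k : Int), ?_, hb, by rw [pv_cand_drop]; exact hdk, hget0⟩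
      apply (PySem.List.mem_pyRange_neg_one).mpr
      constructor <;> omega
  · have hex' : ∀ p ∈ pvItems, ¬ pvCond host p.1 := fun p hp hc => hex ⟨p, hp, hc⟩
    rw [pv_aScan_none host pvItems hex']
    rw [pv_bLoop_none host _ (fun i hi hb => ?_)]
    obtain ⟨k, rfl, hk⟩ := pv_mem_range hi
    rw [pv_cand_drop]
    cases hq : PySem.Dict.get? pvMap (host.drop k) with
    | none => rfl
    | some n =>
        exfalso
        have hmem := PySem.Dict.mem_items_of_get?_eq_some pvMap hq
        exact hex' _ hmem (pv_bnd_cond hk hb)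

-- ===== VERDICT (by name: the statement is the Claim_ definition above) =====
theorem match_url_platform_py_spec : Claim_equal_match_url_platform_py := by
  intro url _
  unfold Spec_match_url_platform_py
  cases url with
  | none => rfl
  | some u =>
      simp only [match_url_platform_py, match_url_platform_py_alt]
      by_cases hu : u = ""
      · simp [hu]
      · simp only [hu, if_false]
        exact pv_scan_eq (pvHost u)
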